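-- pv_equiv track=rewrite | github.com/YutaroOrikasa/ljf-project | pycode/getter_setter_bench.py | getter_setter_bench
-- ===== SOURCE A (Python) =====
-- class GS:
--
--     def __init__(self, v):
--         self._value = v
--
--     def get(self):
--         return self._value
--
--     def set(self, v):
--         self._value = v
--
-- def getter_setter_bench(n):
--     k = 1
--     G = GS(0)
--     S = GS(0)
--     for _ in range(n):
--         r = k + G.get()
--         S.set(r)
--
--         G, S = S, G
--
--     return G.get()
-- ===== SOURCE B (Python) =====
-- def getter_setter_bench(n):
--     # closed form: after each iteration G holds the iteration count
--     return n if n > 0 else 0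
-- ===== Notes on version B (the rewrite author's own statement) =====
-- stated objective: faster
-- what changed: replaced the object-swapping loop by the closed form max(n, 0)
import Mathlib
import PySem

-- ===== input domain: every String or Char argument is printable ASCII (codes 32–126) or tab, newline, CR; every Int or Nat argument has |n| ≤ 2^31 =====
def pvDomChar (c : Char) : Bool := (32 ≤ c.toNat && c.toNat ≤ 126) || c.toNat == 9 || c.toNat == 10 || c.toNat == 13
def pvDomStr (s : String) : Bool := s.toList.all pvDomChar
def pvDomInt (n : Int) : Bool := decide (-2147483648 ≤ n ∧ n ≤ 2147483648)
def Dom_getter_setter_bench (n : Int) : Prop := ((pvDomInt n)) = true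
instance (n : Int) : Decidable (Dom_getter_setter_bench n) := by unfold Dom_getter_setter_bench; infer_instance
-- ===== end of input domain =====

-- B replaces A's object-swapping loop by the closed form max(n, 0); asymptotically faster.


-- ===== PORT A =====
-- state (g, s) mirrors the values held by objects G and S; each iteration:
-- r = k + G.get(); S.set(r); swap G,S  →  (g, s) ↦ (1 + g, g)
def getter_setter_bench (n : Int) : Int :=
  let k : Int := 1
  let gs := (PySem.List.pyRange 0 n 1).foldl
    (fun (p : Int × Int) (_ : Int) => (k + p.1, p.1)) ((0 : Int), (0 : Int))
  gs.1

-- ===== PORT B =====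
def getter_setter_bench_alt (n : Int) : Int := if n > 0 then n else 0

-- ===== PRECONDITION & SPEC =====
def Spec_getter_setter_bench (n : Int) (out : Int) : Prop := out = getter_setter_bench_alt n
instance (n : Int) (out : Int) : Decidable (Spec_getter_setter_bench n out) := by unfold Spec_getter_setter_bench; infer_instance

-- ===== CLAIM (what is proved, stated in full; the proofs are below) =====
def Claim_equal_getter_setter_bench : Prop := ∀ (n : Int), Dom_getter_setter_bench n → Spec_getter_setter_bench n (getter_setter_bench n)

-- ===== LEMMAS AND PROOFS =====
-- the loop body only shifts the pair; the first component gains 1 per element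
theorem gsb_foldl_fst (l : List Int) (g s : Int) :
    (l.foldl (fun (p : Int × Int) (_ : Int) => (1 + p.1, p.1)) (g, s)).1 = g + l.length := by
  induction l generalizing g s with
  | nil => simp
  | cons a t ih => simp [List.foldl, ih]; ring

-- ===== VERDICT (by name: the statement is the Claim_ definition above) =====
theorem getter_setter_bench_spec : Claim_equal_getter_setter_bench := by
  intro n _
  unfold Spec_getter_setter_bench getter_setter_bench getter_setter_bench_alt
  simp only []
  rw [gsb_foldl_fst, PySem.List.length_pyRange_one]
  omega
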